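-- pv_equiv track=rewrite | github.com/UshakovaAnastasia/mipt-archive | Python/bioinformatics/1.py | is_tour_eulerian
-- ===== SOURCE A (Python) =====
-- def edges(graph):
--     for v in graph:
--         for neigh in graph[v]:
--             yield (v, neigh)
--
-- def is_tour_eulerian(tour, graph):
--     edgs = list(edges(graph))
--     for start, end in zip(tour, tour[1:]):
--         try:
--             edgs.remove((start, end))
--         except ValueError:
--             return False
--     if edgs:
--         return False
--     else:
--         return True
-- ===== SOURCE B (Python) =====
-- from collections import Counter
--
-- def edges(graph):
--     for v in graph:
--         for neigh in graph[v]: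
--             yield (v, neigh)
--
-- def is_tour_eulerian(tour, graph):
--     return Counter(zip(tour, tour[1:])) == Counter(edges(graph))
-- ===== Notes on version B (the rewrite author's own statement) =====
-- stated objective: simpler
-- what changed: A consumes a mutable edge list step by step with list.remove inside a try/except and a trailing emptiness check; B builds two Counters (tour's consecutive pairs vs the graph's edges) once and returns a single multiset-equality test, with no per-step branching or early exit.
import Mathlib
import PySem

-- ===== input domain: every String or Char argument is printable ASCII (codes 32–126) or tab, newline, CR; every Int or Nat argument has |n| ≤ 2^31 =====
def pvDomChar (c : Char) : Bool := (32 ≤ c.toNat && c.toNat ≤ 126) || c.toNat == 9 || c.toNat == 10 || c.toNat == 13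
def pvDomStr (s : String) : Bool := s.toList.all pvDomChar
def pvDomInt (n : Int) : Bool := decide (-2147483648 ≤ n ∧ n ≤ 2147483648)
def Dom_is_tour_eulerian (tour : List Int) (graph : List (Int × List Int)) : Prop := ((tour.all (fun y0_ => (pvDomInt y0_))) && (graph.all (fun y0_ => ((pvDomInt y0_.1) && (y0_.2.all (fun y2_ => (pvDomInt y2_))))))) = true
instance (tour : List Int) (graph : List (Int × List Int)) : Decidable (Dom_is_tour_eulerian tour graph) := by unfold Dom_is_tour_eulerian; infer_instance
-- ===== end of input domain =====

-- B replaces A's destructive remove-with-ValueError loop and trailing emptiness check by one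
-- multiset-equality test between the Counter of the tour's consecutive pairs and the Counter of
-- the graph's edges (objective: simpler).

-- ===== PORT A =====
-- module helper 'edges(graph)': for v in graph: for neigh in graph[v]: yield (v, neigh)
-- ('graph[v]' is the dict lookup, first match on the association list)
def pvEdges (graph : List (Int × List Int)) : List (Int × Int) :=
  graph.flatMap (fun p => ((PySem.Dict.mk graph).getD p.1 []).map (fun n => (p.1, n)))

-- the 'for start, end in zip(tour, tour[1:])' loop: remove each pair, False on ValueError,
-- then the trailing 'if edgs: return False else: return True'
def pvLoopA : List (Int × Int) → List (Int × Int) → Bool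
  | [], edgs => edgs.isEmpty
  | p :: ps, edgs =>
    match PySem.List.remove? edgs p with
    | none => false
    | some edgs' => pvLoopA ps edgs'

def is_tour_eulerian (tour : List Int) (graph : List (Int × List Int)) : Bool :=
  pvLoopA (tour.zip (PySem.List.slice tour (some 1) none)) (pvEdges graph)

-- ===== PORT B =====
-- Python dict/Counter '==': same size and every (key, count) item of the left found in the right
def pvCounterEq (c d : PySem.Dict (Int × Int) Int) : Bool :=
  c.size == d.size && c.items.all (fun p => d.get? p.1 == some p.2)

def is_tour_eulerian_alt (tour : List Int) (graph : List (Int × List Int)) : Bool :=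
  pvCounterEq (PySem.Dict.counter (tour.zip (PySem.List.slice tour (some 1) none)))
              (PySem.Dict.counter (pvEdges graph))

-- ===== PRECONDITION & SPEC =====
def Spec_is_tour_eulerian (tour : List Int) (graph : List (Int × List Int)) (out : Bool) : Prop := out = is_tour_eulerian_alt tour graph
instance (tour : List Int) (graph : List (Int × List Int)) (out : Bool) : Decidable (Spec_is_tour_eulerian tour graph out) := by unfold Spec_is_tour_eulerian; infer_instance

-- ===== CLAIM (what is proved, stated in full; the proofs are below) =====
def Claim_equal_is_tour_eulerian : Prop := ∀ (tour : List Int) (graph : List (Int × List Int)), Dom_is_tour_eulerian tour graph → Spec_is_tour_eulerian tour graph (is_tour_eulerian tour graph)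

-- ===== LEMMAS AND PROOFS =====

-- A's loop succeeds with an emptied edge list exactly when the edge list is a permutation of the pairs.
theorem pvLoopA_eq_true_iff (l e : List (Int × Int)) : pvLoopA l e = true ↔ e.Perm l := by
  induction l generalizing e with
  | nil =>
    simp only [pvLoopA, List.isEmpty_iff]
    constructor
    · intro h; rw [h]
    · exact List.Perm.eq_nil
  | cons p ps ih =>
    by_cases hp : p ∈ e
    · rw [pvLoopA, PySem.List.remove?_eq_some_erase e p hp]
      simp only [ih]
      have h1 : e.Perm (p :: e.erase p) := List.perm_cons_erase hp
      constructor
      · intro h; exact h1.trans (h.cons p)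
      · intro h; exact (List.perm_cons p).mp (h1.symm.trans h)
    · rw [pvLoopA, (PySem.List.remove?_eq_none_iff e p).mpr hp]
      simp only [Bool.false_eq_true, false_iff]
      intro h
      exact hp (h.mem_iff.mpr (List.mem_cons_self ..))

-- B's Counter equality test holds exactly when the two underlying lists are permutations.
theorem pvCounterEq_counter_iff (l e : List (Int × Int)) :
    pvCounterEq (PySem.Dict.counter l) (PySem.Dict.counter e) = true ↔ l.Perm e := by
  unfold pvCounterEq
  rw [Bool.and_eq_true, beq_iff_eq, List.all_eq_true]
  constructor
  · rintro ⟨hsize, hall⟩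
    -- every element of l has equal counts in l and e, and occurs in e
    have hkey : ∀ k, k ∈ l → k ∈ e ∧ l.count k = e.count k := by
      intro k hk
      have hm : ((k, (l.count k : Int))) ∈ (PySem.Dict.counter l).items := by
        rw [PySem.Dict.items_counter]
        exact List.mem_map_of_mem ((PySem.Set.mem_ofList l k).mpr hk)
      have h2 := hall _ hm
      rw [beq_iff_eq] at h2
      rw [PySem.Dict.get?_eq_some_iff_mem_items _ _ _ (PySem.Dict.nodup_keys_counter e),
          PySem.Dict.items_counter, List.mem_map] at h2
      obtain ⟨k', hk', hkeq⟩ := h2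
      injection hkeq with h3 h4
      subst h3
      simp only at h4
      exact ⟨(PySem.Set.mem_ofList e k').mp hk', by exact_mod_cast h4.symm⟩
    -- equal key-set sizes force the key sets to coincide
    have hsub : (PySem.Set.ofList l).toFinset ⊆ (PySem.Set.ofList e).toFinset := by
      intro a ha
      rw [List.mem_toFinset, PySem.Set.mem_ofList] at ha ⊢
      exact (hkey a ha).1
    have hlen : ((PySem.Set.ofList e).toFinset).card ≤ ((PySem.Set.ofList l).toFinset).card := by
      rw [List.toFinset_card_of_nodup (PySem.Set.nodup_ofList l),
          List.toFinset_card_of_nodup (PySem.Set.nodup_ofList e)]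
      simp only [PySem.Dict.size, PySem.Dict.items_counter, List.length_map] at hsize
      omega
    have hset := Finset.eq_of_subset_of_card_le hsub hlen
    rw [List.perm_iff_count]
    intro a
    by_cases ha : a ∈ l
    · exact (hkey a ha).2
    · have hae : a ∉ e := by
        intro hae
        apply ha
        have : a ∈ (PySem.Set.ofList l).toFinset := by
          rw [hset, List.mem_toFinset, PySem.Set.mem_ofList]; exact hae
        rw [List.mem_toFinset, PySem.Set.mem_ofList] at this
        exact this
      rw [List.count_eq_zero_of_not_mem ha, List.count_eq_zero_of_not_mem hae]
  · intro hperm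
    have hmemiff : ∀ a, a ∈ PySem.Set.ofList l ↔ a ∈ PySem.Set.ofList e := by
      intro a
      rw [PySem.Set.mem_ofList, PySem.Set.mem_ofList]
      exact hperm.mem_iff
    constructor
    · simp only [PySem.Dict.size, PySem.Dict.items_counter, List.length_map]
      exact ((List.perm_ext_iff_of_nodup (PySem.Set.nodup_ofList l)
        (PySem.Set.nodup_ofList e)).mpr hmemiff).length_eq
    · intro p hp
      rw [PySem.Dict.items_counter, List.mem_map] at hp
      obtain ⟨k, hk, hkeq⟩ := hp
      subst hkeq
      rw [beq_iff_eq]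
      rw [PySem.Dict.get?_eq_some_iff_mem_items _ _ _ (PySem.Dict.nodup_keys_counter e),
          PySem.Dict.items_counter, List.mem_map]
      refine ⟨k, (hmemiff k).mp hk, ?_⟩
      rw [List.perm_iff_count.mp hperm k]

theorem is_tour_eulerian_spec : Claim_equal_is_tour_eulerian := by
  intro tour graph _
  unfold Spec_is_tour_eulerian is_tour_eulerian is_tour_eulerian_alt
  rw [Bool.eq_iff_iff, pvLoopA_eq_true_iff, pvCounterEq_counter_iff]
  exact ⟨List.Perm.symm, List.Perm.symm⟩
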